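-- pv_equiv track=rewrite | github.com/Makson61/PY_Konovalov | PZ_6/PZ_6(1).py | possitive
-- ===== SOURCE A (Python) =====
-- def possitive(A):
--     n = len(A)
--     result = []
--     left = 0
--     right = n - 1
--     secret = True
--
--     while left <= right:
--         if secret:
--             # Берём до двух элементов спереди
--             if left <= right:
--                 result.append(A[left])
--                 left += 1
--             if left <= right:
--                 result.append(A[left])
--                 left += 1
--         else:
--             # Берём до двух элементов сзади.
--             if left <= right:
--                 result.append(A[right])
--                 right -= 1
--             if left <= right:
--                 result.append(A[right])
--                 right -= 1
--         secret = not secret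
--
--     return result
-- ===== SOURCE B (Python) =====
-- def possitive(A):
--     if not A:
--         return []
--     k1 = min(2, len(A))
--     rest = A[k1:]
--     k2 = min(2, len(rest))
--     mid = rest[:len(rest) - k2]
--     back = rest[len(rest) - k2:]
--     return A[:k1] + back[::-1] + possitive(mid)
-- ===== Notes on version B (the rewrite author's own statement) =====
-- stated objective: simpler
-- what changed: Replaces A's two-pointer while loop with mutable left/right indices and an alternating flag by a direct structural recursion: take up to two elements from the front, up to two from the back reversed, and recurse on the interior slice.
import Mathlib
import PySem

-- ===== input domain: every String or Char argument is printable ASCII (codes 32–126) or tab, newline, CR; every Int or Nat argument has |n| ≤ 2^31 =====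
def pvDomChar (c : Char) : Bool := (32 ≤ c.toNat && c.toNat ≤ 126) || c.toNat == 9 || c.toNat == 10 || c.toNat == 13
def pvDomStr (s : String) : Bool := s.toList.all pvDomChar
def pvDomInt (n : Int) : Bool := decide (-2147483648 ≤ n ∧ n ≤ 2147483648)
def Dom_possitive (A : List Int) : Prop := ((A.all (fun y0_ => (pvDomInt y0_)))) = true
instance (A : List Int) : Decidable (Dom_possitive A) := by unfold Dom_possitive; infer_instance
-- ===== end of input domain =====

-- B re-implements the alternating front/back pairing as a structural recursion (take ≤2 front,
-- ≤2 back, recurse on the interior) instead of A's two-pointer while loop; objective: simpler.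

-- ===== PORT A =====
-- A's while loop on (left, right, secret, result); each branch appends up to two elements,
-- exactly mirroring the nested `if left <= right` checks (the index is always in range, so
-- `(pyGet? …).getD 0` is the accessed element).
def possLoop (A : List Int) (l r : Int) (secret : Bool) (result : List Int) : List Int :=
  if _h : l ≤ r then
    if secret then
      if l + 1 ≤ r then
        possLoop A (l + 2) r false
          (result ++ [(PySem.List.pyGet? A l).getD 0] ++ [(PySem.List.pyGet? A (l + 1)).getD 0])
      else
        possLoop A (l + 1) r false (result ++ [(PySem.List.pyGet? A l).getD 0])
    else
      if l ≤ r - 1 then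
        possLoop A l (r - 2) true
          (result ++ [(PySem.List.pyGet? A r).getD 0] ++ [(PySem.List.pyGet? A (r - 1)).getD 0])
      else
        possLoop A l (r - 1) true (result ++ [(PySem.List.pyGet? A r).getD 0])
  else result
termination_by (r - l + 1).toNat
decreasing_by all_goals omega

def possitive (A : List Int) : List Int :=
  possLoop A 0 ((A.length : Int) - 1) true []

-- ===== PORT B =====
def possitive_alt (A : List Int) : List Int :=
  if _h : A = [] then []
  else
    let k1 := min 2 A.length
    let rest := A.drop k1
    let k2 := min 2 rest.length
    let mid := rest.take (rest.length - k2)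
    let back := rest.drop (rest.length - k2)
    A.take k1 ++ back.reverse ++ possitive_alt mid
termination_by A.length
decreasing_by
  simp only [List.length_take, List.length_drop]
  have : 0 < A.length := List.length_pos_of_ne_nil _h
  omega

-- ===== PRECONDITION & SPEC =====
def Spec_possitive (A : List Int) (out : List Int) : Prop := out = possitive_alt A
instance (A : List Int) (out : List Int) : Decidable (Spec_possitive A out) := by unfold Spec_possitive; infer_instance

-- ===== CLAIM (what is proved, stated in full; the proofs are below) =====
def Claim_equal_possitive : Prop := ∀ (A : List Int), Dom_possitive A → Spec_possitive A (possitive A)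

-- ===== LEMMAS AND PROOFS =====

lemma drop_cons_getD (A : List Int) (i : Nat) (h : i < A.length) :
    A.drop i = A.getD i 0 :: A.drop (i + 1) := by
  rw [List.drop_eq_getElem_cons h, List.getD_eq_getElem _ _ h]


lemma pyget_getD (A : List Int) (j : Int) (n : Nat) (hj : j = (n:Int)) (_h : n < A.length) :
    (PySem.List.pyGet? A j).getD 0 = A.getD n 0 := by
  subst hj; simp [List.getD_eq_getElem?_getD]

lemma loop_eq (m : Nat) : ∀ (A : List Int) (i : Nat) (acc : List Int), i + m ≤ A.length →
    possLoop A (i : Int) ((i : Int) + (m : Int) - 1) true acc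
      = acc ++ possitive_alt ((A.drop i).take m) := by
  induction m using Nat.strong_induction_on with
  | _ m IH =>
  intro A i acc h
  match m, h with
  | 0, h =>
    rw [possLoop, dif_neg (by push_cast; omega)]
    simp [possitive_alt]
  | 1, h =>
    rw [possLoop, dif_pos (by push_cast; omega), if_pos rfl, if_neg (by push_cast; omega),
      possLoop, dif_neg (by push_cast; omega)]
    rw [drop_cons_getD A i (by omega)]
    simp [possitive_alt]
  | 2, h =>
    rw [possLoop, dif_pos (by push_cast; omega), if_pos rfl, if_pos (by push_cast; omega),
      possLoop, dif_neg (by push_cast; omega)]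
    rw [drop_cons_getD A i (by omega), drop_cons_getD A (i+1) (by omega),
      pyget_getD A ((i:Int)+1) (i+1) (by push_cast; ring) (by omega)]
    simp [possitive_alt]
  | 3, h =>
    rw [possLoop, dif_pos (by push_cast; omega), if_pos rfl, if_pos (by push_cast; omega),
      possLoop, dif_pos (by push_cast; omega), if_neg (by trivial), if_neg (by push_cast; omega),
      possLoop, dif_neg (by push_cast; omega)]
    rw [drop_cons_getD A i (by omega), drop_cons_getD A (i+1) (by omega),
      drop_cons_getD A (i+2) (by omega),
      pyget_getD A ((i:Int)+1) (i+1) (by push_cast; ring) (by omega),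
      pyget_getD A ((i:Int)+(3:Nat)-1) (i+2) (by push_cast; ring) (by omega)]
    simp [possitive_alt]
  | 4, h =>
    rw [possLoop, dif_pos (by push_cast; omega), if_pos rfl, if_pos (by push_cast; omega),
      possLoop, dif_pos (by push_cast; omega), if_neg (by trivial), if_pos (by push_cast; omega),
      possLoop, dif_neg (by push_cast; omega)]
    rw [drop_cons_getD A i (by omega), drop_cons_getD A (i+1) (by omega),
      drop_cons_getD A (i+2) (by omega), drop_cons_getD A (i+3) (by omega),
      pyget_getD A ((i:Int)+1) (i+1) (by push_cast; ring) (by omega),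
      pyget_getD A ((i:Int)+(4:Nat)-1) (i+3) (by push_cast; ring) (by omega),
      pyget_getD A ((i:Int)+(4:Nat)-1-1) (i+2) (by push_cast; ring) (by omega)]
    simp [possitive_alt]
  | (k+5), h =>
    rw [possLoop, dif_pos (by push_cast; omega), if_pos rfl, if_pos (by push_cast; omega),
      possLoop, dif_pos (by push_cast; omega), if_neg (by trivial), if_pos (by push_cast; omega)]
    have e1 : (i:Int) + 2 = ((i+2 : Nat) : Int) := by push_cast; ring
    have e2 : (i:Int) + ((k+5:Nat):Int) - 1 - 2 = ((i+2:Nat):Int) + ((k+1:Nat):Int) - 1 := by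
      push_cast; ring
    rw [e1, e2, IH (k+1) (by omega) A (i+2) _ (by omega)]
    -- now rewrite elements and the RHS window
    rw [pyget_getD A ((i:Int)+1) (i+1) (by push_cast; ring) (by omega),
      pyget_getD A ((i:Int)+((k+5:Nat):Int)-1) (i+k+4) (by push_cast; ring) (by omega),
      pyget_getD A ((i:Int)+((k+5:Nat):Int)-1-1) (i+k+3) (by push_cast; ring) (by omega),
      pyget_getD A (i:Int) i rfl (by omega)]
    -- RHS: one unfolding of possitive_alt on the window
    have hw : (A.drop i).take (k+5)
        = A.getD i 0 :: A.getD (i+1) 0 :: ((A.drop (i+2)).take (k+3)) := by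
      rw [drop_cons_getD A i (by omega), drop_cons_getD A (i+1) (by omega)]
      rfl
    have hlen : ((A.drop (i+2)).take (k+3)).length = k+3 := by
      simp; omega
    have hback : ((A.drop (i+2)).take (k+3)).drop (k+1)
        = [A.getD (i+k+3) 0, A.getD (i+k+4) 0] := by
      rw [List.drop_take, List.drop_drop]
      have e3 : k + 3 - (k+1) = 2 := by omega
      have e4 : i + 2 + (k+1) = i + k + 3 := by omega
      rw [e3, e4, drop_cons_getD A (i+k+3) (by omega)]
      rw [show i+k+3+1 = i+k+4 from by omega, drop_cons_getD A (i+k+4) (by omega)]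
      simp [List.take]
    have hmid : ((A.drop (i+2)).take (k+3)).take (k+1) = (A.drop (i+2)).take (k+1) := by
      rw [List.take_take]; congr 1; omega
    conv_rhs => rw [possitive_alt]
    rw [dif_neg (by rw [hw]; simp)]
    simp only [hw]
    simp only [List.length_cons, hlen]
    have hk1 : min 2 (k+3+1+1) = 2 := by omega
    simp only [hk1, List.drop_succ_cons, List.take_succ_cons, List.drop]
    have hk2 : min 2 (k+3) = 2 := by omega
    simp only [hlen, hk2, show k+3-2 = k+1 from by omega, hback, hmid, List.take_zero]
    simp

theorem possitive_spec : Claim_equal_possitive := by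
  intro A _
  unfold Spec_possitive possitive
  have := loop_eq A.length A 0 [] (by simp)
  simpa using this
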